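-- pv_equiv track=rewrite | github.com/eeshanl/Coding-Problems | CodingPrep2024/blah.py | find_reachable_towers
-- ===== SOURCE A (Python) =====
-- def propagate_direction(grid, reachable_towers, row, col, d_row, d_col):
--     """
--     Helper function to propagate signal in a specific direction.
--
--     Args:
--         grid (list): 2D list representing the area with towers and obstacles.
--         reachable_towers (list): List to store the towers that the signal can reach.
--         row (int): Current row position.
--         col (int): Current column position.
--         d_row (int): Direction to move in row (1 for down, -1 for up, 0 for no movement).
--         d_col (int): Direction to move in column (1 for right, -1 for left, 0 for no movement).
--
--     Returns:
--         None
--     """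
--     # Store the initial position
--     start_row = row
--     start_col = col
--
--     while row < len(grid) and col < len(grid[0]) and row >= 0 and col >= 0 and grid[row][col] != 'obstacle':
--
--         if grid[row][col] == 'tower' and (row, col) != (start_row, start_col):
--             reachable_towers.append((row, col))  # Add the tower to the list
--
--         row += d_row
--         col += d_col
--
-- def propagate_signal(grid, start_row, start_col):
--     """
--     Function to propagate the signal from a radio tower in all four directions until it hits an obstacle or boundary.
--     Return the list of towers that the signal can reach.
--
--     :param grid: 2D list representing the area with towers and obstacles.
--     :param start_row: Starting row of the radio tower.
--     :param start_col: Starting column of the radio tower.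
--     :return: List of tuples representing towers that the signal can reach.
--     """
--     rows = len(grid)
--     cols = len(grid[0])
--     reachable_towers = []
--
--     # Propagate in all four directions
--     propagate_direction(grid, reachable_towers, start_row, start_col, -1, 0)  # Up
--     propagate_direction(grid, reachable_towers, start_row, start_col, 1, 0)   # Down
--     propagate_direction(grid, reachable_towers, start_row, start_col, 0, -1)  # Left
--     propagate_direction(grid, reachable_towers, start_row, start_col, 0, 1)   # Right
--
--     return reachable_towers
--
-- def find_reachable_towers(grid):
--     """
--     Find all towers and the towers they can reach with their signals.
--
--     :param grid: 2D list representing the area with towers and obstacles.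
--     :return: Dictionary with tower positions as keys and lists of reachable tower positions as values.
--     """
--     rows = len(grid)
--     cols = len(grid[0])
--     tower_reach = {}
--
--     for row in range(rows):
--         for col in range(cols):
--             if grid[row][col] == 'tower':
--                 reachable_towers = propagate_signal(grid, row, col)
--                 tower_reach[(row, col)] = reachable_towers
--
--     return tower_reach
-- ===== SOURCE B (Python) =====
-- def find_reachable_towers(grid):
--     """Single-pass sweep version: two grid sweeps precompute, for every tower,
--     the towers already seen in its row/column segment (nearest first), instead
--     of re-scanning four rays from every tower."""
--     rows = len(grid)
--     cols = len(grid[0])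
--
--     def sweep(row_range, col_range):
--         col_acc = {}
--         seen = {}
--         for r in row_range:
--             row_acc = []
--             for c in col_range:
--                 cell = grid[r][c]
--                 if cell == 'obstacle':
--                     col_acc[c] = []
--                     row_acc = []
--                 elif cell == 'tower':
--                     v = col_acc.get(c, [])
--                     seen[(r, c)] = (v[::-1], row_acc[::-1])
--                     col_acc[c] = v + [(r, c)]
--                     row_acc = row_acc + [(r, c)]
--         return seen
--
--     fwd = sweep(range(rows), range(cols))
--     bwd = sweep(range(rows - 1, -1, -1), range(cols - 1, -1, -1))
--
--     result = {}
--     for r in range(rows):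
--         for c in range(cols):
--             if grid[r][c] == 'tower':
--                 up, left = fwd[(r, c)]
--                 down, right = bwd[(r, c)]
--                 result[(r, c)] = up + down + left + right
--     return result
-- ===== Notes on version B (the rewrite author's own statement) =====
-- stated objective: alternative
-- what changed: A re-scans four rays from every tower; B makes one forward and one backward sweep over the grid carrying per-column and per-row accumulators of towers seen since the last obstacle, so each tower's four reachable lists are read off the accumulators.
import Mathlib
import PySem

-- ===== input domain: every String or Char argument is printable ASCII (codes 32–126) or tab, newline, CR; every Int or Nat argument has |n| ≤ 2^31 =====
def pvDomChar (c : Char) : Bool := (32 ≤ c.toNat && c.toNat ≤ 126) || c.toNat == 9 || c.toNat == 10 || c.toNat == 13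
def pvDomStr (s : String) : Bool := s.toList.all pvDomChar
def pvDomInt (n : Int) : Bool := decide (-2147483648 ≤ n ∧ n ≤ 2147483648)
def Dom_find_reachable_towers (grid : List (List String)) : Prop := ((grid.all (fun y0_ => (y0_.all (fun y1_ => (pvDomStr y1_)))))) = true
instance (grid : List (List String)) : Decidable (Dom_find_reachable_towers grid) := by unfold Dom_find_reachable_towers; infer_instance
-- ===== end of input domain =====

-- B replaces A's four per-tower ray scans by two whole-grid sweeps that carry per-column /
-- per-row accumulators of the towers seen since the last obstacle (objective: alternative
-- algorithm; not measured faster).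

-- ===== PORT A =====
-- grid[r][c]; every use is guarded so that 0 ≤ r < len(grid), 0 ≤ c < len(grid[0]) and
-- (by Pre_) c is inside row r, where Python's indexing is exactly this getD
def pvCell (grid : List (List String)) (r c : Int) : String :=
  (grid.getD r.toNat []).getD c.toNat ""

-- the while-loop of propagate_direction; the list is the towers appended, in visit order.
-- fuel is an upper bound on the iteration count (the loop moves one step per iteration
-- in a single coordinate, so pvFuel below is always enough for the four calls made)
def pvPropDir (grid : List (List String)) (startR startC : Int) :
    Int → Int → Int → Int → Nat → List (Int × Int)
  | _, _, _, _, 0 => []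
  | row, col, dR, dC, fuel+1 =>
    if row < (grid.length : Int) ∧ col < ((grid.headD []).length : Int) ∧ 0 ≤ row ∧ 0 ≤ col ∧
        pvCell grid row col ≠ "obstacle" then
      (if pvCell grid row col = "tower" ∧ ¬(row = startR ∧ col = startC) then [(row, col)] else [])
        ++ pvPropDir grid startR startC (row + dR) (col + dC) dR dC fuel
    else []

def pvFuel (grid : List (List String)) : Nat := grid.length + (grid.headD []).length + 2

def pvPropagateSignal (grid : List (List String)) (sr sc : Int) : List (Int × Int) :=
  pvPropDir grid sr sc sr sc (-1) 0 (pvFuel grid)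
    ++ pvPropDir grid sr sc sr sc 1 0 (pvFuel grid)
    ++ pvPropDir grid sr sc sr sc 0 (-1) (pvFuel grid)
    ++ pvPropDir grid sr sc sr sc 0 1 (pvFuel grid)

-- tower_reach is a dict keyed by the (row, col) of the towers met by the row-major loop;
-- those keys are pairwise distinct, so each insert appends and the dict is this list
def find_reachable_towers (grid : List (List String)) : List (Int × Int × List (Int × Int)) :=
  let rows : Int := grid.length
  let cols : Int := (grid.headD []).length
  (PySem.List.pyRange 0 rows 1).foldl (fun acc r =>
    (PySem.List.pyRange 0 cols 1).foldl (fun acc c =>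
      if pvCell grid r c == "tower" then acc ++ [(r, c, pvPropagateSignal grid r c)] else acc)
      acc) []

-- ===== PORT B =====
-- body of the inner loop of sweep in Source B: state = (col_acc, row_acc, seen)
def pvSweepStep (grid : List (List String)) (r : Int)
    (st2 : PySem.Dict Int (List (Int × Int)) × List (Int × Int) ×
           PySem.Dict (Int × Int) (List (Int × Int) × List (Int × Int))) (c : Int) :
    PySem.Dict Int (List (Int × Int)) × List (Int × Int) ×
      PySem.Dict (Int × Int) (List (Int × Int) × List (Int × Int)) :=
  let cell := pvCell grid r c
  if cell == "obstacle" then (st2.1.insert c [], [], st2.2.2)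
  else if cell == "tower" then
    let v := st2.1.getD c []
    (st2.1.insert c (v ++ [(r, c)]), st2.2.1 ++ [(r, c)],
      st2.2.2.insert (r, c) (v.reverse, st2.2.1.reverse))  -- v[::-1] is List.reverse
  else st2

-- one row of sweep: row_acc starts at []; col_acc and seen survive into the next row
def pvSweepRow (grid : List (List String)) (colRange : List Int)
    (st : PySem.Dict Int (List (Int × Int)) ×
          PySem.Dict (Int × Int) (List (Int × Int) × List (Int × Int))) (r : Int) :
    PySem.Dict Int (List (Int × Int)) ×
      PySem.Dict (Int × Int) (List (Int × Int) × List (Int × Int)) :=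
  let inner := colRange.foldl (pvSweepStep grid r) (st.1, [], st.2)
  (inner.1, inner.2.2)

def pvSweep (grid : List (List String)) (rowRange colRange : List Int) :
    PySem.Dict (Int × Int) (List (Int × Int) × List (Int × Int)) :=
  (rowRange.foldl (pvSweepRow grid colRange)
    ((PySem.Dict.empty : PySem.Dict Int (List (Int × Int))),
     (PySem.Dict.empty : PySem.Dict (Int × Int) (List (Int × Int) × List (Int × Int))))).2

-- result is a dict keyed by the distinct (row, col) of the towers, so it is this list;
-- the fwd/bwd lookups are total getD: the sweeps recorded every tower cell
def find_reachable_towers_alt (grid : List (List String)) : List (Int × Int × List (Int × Int)) :=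
  let rows : Int := grid.length
  let cols : Int := (grid.headD []).length
  let fwd := pvSweep grid (PySem.List.pyRange 0 rows 1) (PySem.List.pyRange 0 cols 1)
  let bwd := pvSweep grid (PySem.List.pyRange (rows - 1) (-1) (-1))
                          (PySem.List.pyRange (cols - 1) (-1) (-1))
  (PySem.List.pyRange 0 rows 1).foldl (fun acc r =>
    (PySem.List.pyRange 0 cols 1).foldl (fun acc c =>
      if pvCell grid r c == "tower" then
        let f := fwd.getD (r, c) ([], [])
        let b := bwd.getD (r, c) ([], [])
        acc ++ [(r, c, f.1 ++ b.1 ++ f.2 ++ b.2)]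
      else acc)
      acc) []

-- ===== PRECONDITION & SPEC =====
-- Pre_ excludes exactly the inputs on which Python A raises IndexError: the empty grid
-- (len(grid[0])) and grids with a row shorter than the first row (grid[row][col])
def Pre_find_reachable_towers (grid : List (List String)) : Prop :=
  grid ≠ [] ∧ ∀ row ∈ grid, (grid.headD []).length ≤ row.length

instance (grid : List (List String)) : Decidable (Pre_find_reachable_towers grid) := by
  unfold Pre_find_reachable_towers; infer_instance

def pvWitness_find_reachable_towers : List (List String) :=
  [["tower", "."], ["obstacle", "tower"]]

def Spec_find_reachable_towers (grid : List (List String)) (out : List (Int × Int × List (Int × Int))) : Prop := out = find_reachable_towers_alt grid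
instance (grid : List (List String)) (out : List (Int × Int × List (Int × Int))) : Decidable (Spec_find_reachable_towers grid out) := by unfold Spec_find_reachable_towers; infer_instance

-- ===== CLAIM (what is proved, stated in full; the proofs are below) =====
def Claim_equal_find_reachable_towers : Prop := ∀ (grid : List (List String)), Dom_find_reachable_towers grid → Pre_find_reachable_towers grid → Spec_find_reachable_towers grid (find_reachable_towers grid)

-- ===== LEMMAS AND PROOFS =====

-- scan of one line (a row or a column), collecting towers until an obstacle:
-- pvLineBack f e t visits t-1, t-2, …, 0; pvLineFwd f e k t visits t, t+1, …, t+k-1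
def pvLineBack (f : Nat → String) (emit : Nat → Int × Int) : Nat → List (Int × Int)
  | 0 => []
  | t+1 => if f t = "obstacle" then [] else
      (if f t = "tower" then [emit t] else []) ++ pvLineBack f emit t

def pvLineFwd (f : Nat → String) (emit : Nat → Int × Int) : Nat → Nat → List (Int × Int)
  | 0, _ => []
  | k+1, t => if f t = "obstacle" then [] else
      (if f t = "tower" then [emit t] else []) ++ pvLineFwd f emit k (t+1)

def pvColF (grid : List (List String)) (c : Nat) : Nat → String := fun t => pvCell grid t c
def pvRowF (grid : List (List String)) (r : Nat) : Nat → String := fun t => pvCell grid r t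
def pvEmitCol (c : Nat) : Nat → Int × Int := fun t => ((t : Int), (c : Int))
def pvEmitRow (r : Nat) : Nat → Int × Int := fun t => ((r : Int), (t : Int))

def pvUp (grid : List (List String)) (r c : Nat) : List (Int × Int) :=
  pvLineBack (pvColF grid c) (pvEmitCol c) r
def pvDown (grid : List (List String)) (r c : Nat) : List (Int × Int) :=
  pvLineFwd (pvColF grid c) (pvEmitCol c) (grid.length - r) r
def pvLeft (grid : List (List String)) (r c : Nat) : List (Int × Int) :=
  pvLineBack (pvRowF grid r) (pvEmitRow r) c
def pvRight (grid : List (List String)) (r c : Nat) : List (Int × Int) :=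
  pvLineFwd (pvRowF grid r) (pvEmitRow r) ((grid.headD []).length - c) c

def pvVal (grid : List (List String)) (r c : Nat) : List (Int × Int) :=
  pvUp grid r c ++ pvDown grid (r+1) c ++ pvLeft grid r c ++ pvRight grid r (c+1)

def pvSpecList (grid : List (List String)) : List (Int × Int × List (Int × Int)) :=
  (List.range grid.length).flatMap (fun (r : Nat) =>
    ((List.range (grid.headD []).length).filter
        (fun (c : Nat) => pvCell grid (r : Int) (c : Int) == "tower")).map
      (fun (c : Nat) => ((r : Int), (c : Int), pvVal grid r c)))

theorem pvRange_cast (n : Nat) :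
    PySem.List.pyRange 0 (n : Int) 1 = (List.range n).map (fun (k : Nat) => (k : Int)) := by
  rw [PySem.List.pyRange_one, sub_zero, Int.toNat_natCast]
  exact List.map_congr_left (fun k _ => by simp)

-- one-step unfolding of the while loop (controlled; simp on pvPropDir would over-unfold)
theorem pvPropDir_succ (grid : List (List String)) (startR startC row col dR dC : Int) (f : Nat) :
    pvPropDir grid startR startC row col dR dC (f + 1) =
      if row < (grid.length : Int) ∧ col < ((grid.headD []).length : Int) ∧ 0 ≤ row ∧ 0 ≤ col ∧
          pvCell grid row col ≠ "obstacle" then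
        (if pvCell grid row col = "tower" ∧ ¬(row = startR ∧ col = startC) then [(row, col)] else [])
          ++ pvPropDir grid startR startC (row + dR) (col + dC) dR dC f
      else [] := rfl

theorem pvPropDir_back_col (grid : List (List String)) (r c : Nat)
    (hr : r < grid.length) (hc : c < (grid.headD []).length) :
    ∀ (t fuel : Nat), t ≤ r → t < fuel →
      pvPropDir grid (r : Int) (c : Int) ((t : Int) - 1) (c : Int) (-1) 0 fuel =
        pvLineBack (pvColF grid c) (pvEmitCol c) t := by
  intro t
  induction t with
  | zero =>
      intro fuel ht hf
      obtain ⟨f, rfl⟩ : ∃ f, fuel = f + 1 := ⟨fuel - 1, by omega⟩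
      simp only [pvPropDir]
      rw [if_neg (by intro h; have := h.2.2.1; omega)]
      rfl
  | succ t ih =>
      intro fuel ht hf
      obtain ⟨f, rfl⟩ : ∃ f, fuel = f + 1 := ⟨fuel - 1, by omega⟩
      have hrow : ((t + 1 : Nat) : Int) - 1 = (t : Int) := by push_cast; ring
      rw [hrow]
      simp only [pvPropDir]
      by_cases hob : pvCell grid (t : Int) (c : Int) = "obstacle"
      · rw [if_neg (by intro h; exact h.2.2.2.2 hob)]
        simp [pvLineBack, pvColF, hob]
      · rw [if_pos ⟨by exact_mod_cast (by omega : t < grid.length),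
            by exact_mod_cast hc, by positivity, by positivity, hob⟩]
        have hne : ¬(((t : Nat) : Int) = (r : Int) ∧ ((c : Nat) : Int) = (c : Int)) := by
          intro h
          have : (t : Nat) = r := by exact_mod_cast h.1
          omega
        have harr : ((t : Nat) : Int) + -1 = ((t : Nat) : Int) - 1 := by ring
        rw [harr, add_zero, ih f (by omega) (by omega)]
        simp only [pvLineBack, pvColF, pvEmitCol]
        rw [if_neg hob]
        simp [show t ≠ r from by omega]

theorem pvPropDir_fwd_col (grid : List (List String)) (r c : Nat)
    (hc : c < (grid.headD []).length) :
    ∀ (k : Nat), ∀ (t fuel : Nat), t + k = grid.length → k < fuel → r < t →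
      pvPropDir grid (r : Int) (c : Int) (t : Int) (c : Int) 1 0 fuel =
        pvLineFwd (pvColF grid c) (pvEmitCol c) k t := by
  intro k
  induction k with
  | zero =>
      intro t fuel htk hf hrt
      obtain ⟨f, rfl⟩ : ∃ f, fuel = f + 1 := ⟨fuel - 1, by omega⟩
      simp only [pvPropDir]
      rw [if_neg (by intro h; have := h.1; omega)]
      rfl
  | succ k ih =>
      intro t fuel htk hf hrt
      obtain ⟨f, rfl⟩ : ∃ f, fuel = f + 1 := ⟨fuel - 1, by omega⟩
      simp only [pvPropDir]
      by_cases hob : pvCell grid (t : Int) (c : Int) = "obstacle"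
      · rw [if_neg (by intro h; exact h.2.2.2.2 hob)]
        simp [pvLineFwd, pvColF, hob]
      · rw [if_pos ⟨by exact_mod_cast (by omega : t < grid.length),
            by exact_mod_cast hc, by positivity, by positivity, hob⟩]
        have hne : ¬(((t : Nat) : Int) = (r : Int) ∧ ((c : Nat) : Int) = (c : Int)) := by
          intro h
          have : (t : Nat) = r := by exact_mod_cast h.1
          omega
        have harr : ((t : Nat) : Int) + 1 = ((t + 1 : Nat) : Int) := by push_cast; ring
        rw [harr, add_zero, ih (t + 1) f (by omega) (by omega) (by omega)]
        simp only [pvLineFwd, pvColF, pvEmitCol]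
        rw [if_neg hob]
        simp [show t ≠ r from by omega]

theorem pvPropDir_back_row (grid : List (List String)) (r c : Nat)
    (hr : r < grid.length) (hc : c < (grid.headD []).length) :
    ∀ (t fuel : Nat), t ≤ c → t < fuel →
      pvPropDir grid (r : Int) (c : Int) (r : Int) ((t : Int) - 1) 0 (-1) fuel =
        pvLineBack (pvRowF grid r) (pvEmitRow r) t := by
  intro t
  induction t with
  | zero =>
      intro fuel ht hf
      obtain ⟨f, rfl⟩ : ∃ f, fuel = f + 1 := ⟨fuel - 1, by omega⟩
      simp only [pvPropDir]
      rw [if_neg (by intro h; have := h.2.2.2.1; omega)]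
      rfl
  | succ t ih =>
      intro fuel ht hf
      obtain ⟨f, rfl⟩ : ∃ f, fuel = f + 1 := ⟨fuel - 1, by omega⟩
      have hcol : ((t + 1 : Nat) : Int) - 1 = (t : Int) := by push_cast; ring
      rw [hcol]
      simp only [pvPropDir]
      by_cases hob : pvCell grid (r : Int) (t : Int) = "obstacle"
      · rw [if_neg (by intro h; exact h.2.2.2.2 hob)]
        simp [pvLineBack, pvRowF, hob]
      · rw [if_pos ⟨by exact_mod_cast hr,
            by exact_mod_cast (by omega : t < (grid.headD []).length),
            by positivity, by positivity, hob⟩]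
        have hne : ¬(((r : Nat) : Int) = (r : Int) ∧ ((t : Nat) : Int) = (c : Int)) := by
          intro h
          have : (t : Nat) = c := by exact_mod_cast h.2
          omega
        have harr : ((t : Nat) : Int) + -1 = ((t : Nat) : Int) - 1 := by ring
        rw [harr, add_zero, ih f (by omega) (by omega)]
        simp only [pvLineBack, pvRowF, pvEmitRow]
        rw [if_neg hob]
        simp [show t ≠ c from by omega]

theorem pvPropDir_fwd_row (grid : List (List String)) (r c : Nat)
    (hr : r < grid.length) :
    ∀ (k : Nat), ∀ (t fuel : Nat), t + k = (grid.headD []).length → k < fuel → c < t →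
      pvPropDir grid (r : Int) (c : Int) (r : Int) (t : Int) 0 1 fuel =
        pvLineFwd (pvRowF grid r) (pvEmitRow r) k t := by
  intro k
  induction k with
  | zero =>
      intro t fuel htk hf hct
      obtain ⟨f, rfl⟩ : ∃ f, fuel = f + 1 := ⟨fuel - 1, by omega⟩
      simp only [pvPropDir]
      rw [if_neg (by intro h; have := h.2.1; omega)]
      rfl
  | succ k ih =>
      intro t fuel htk hf hct
      obtain ⟨f, rfl⟩ : ∃ f, fuel = f + 1 := ⟨fuel - 1, by omega⟩
      simp only [pvPropDir]
      by_cases hob : pvCell grid (r : Int) (t : Int) = "obstacle"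
      · rw [if_neg (by intro h; exact h.2.2.2.2 hob)]
        simp [pvLineFwd, pvRowF, hob]
      · rw [if_pos ⟨by exact_mod_cast hr,
            by exact_mod_cast (by omega : t < (grid.headD []).length),
            by positivity, by positivity, hob⟩]
        have hne : ¬(((r : Nat) : Int) = (r : Int) ∧ ((t : Nat) : Int) = (c : Int)) := by
          intro h
          have : (t : Nat) = c := by exact_mod_cast h.2
          omega
        have harr : ((t : Nat) : Int) + 1 = ((t + 1 : Nat) : Int) := by push_cast; ring
        rw [harr, add_zero, ih (t + 1) f (by omega) (by omega) (by omega)]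
        simp only [pvLineFwd, pvRowF, pvEmitRow]
        rw [if_neg hob]
        simp [show t ≠ c from by omega]

theorem pvPropagate_eq (grid : List (List String)) (r c : Nat)
    (hr : r < grid.length) (hc : c < (grid.headD []).length)
    (ht : pvCell grid (r : Int) (c : Int) = "tower") :
    pvPropagateSignal grid (r : Int) (c : Int) = pvVal grid r c := by
  have hnob : pvCell grid (r : Int) (c : Int) ≠ "obstacle" := by rw [ht]; decide
  have hfuel : pvFuel grid = (grid.length + (grid.headD []).length + 1) + 1 := by
    simp [pvFuel]
  have hcond : (r : Int) < (grid.length : Int) ∧ (c : Int) < ((grid.headD []).length : Int) ∧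
      (0 : Int) ≤ (r : Int) ∧ (0 : Int) ≤ (c : Int) ∧ pvCell grid (r : Int) (c : Int) ≠ "obstacle" :=
    ⟨by exact_mod_cast hr, by exact_mod_cast hc, by positivity, by positivity, hnob⟩
  have hself : ¬(pvCell grid (r : Int) (c : Int) = "tower" ∧
      ¬((r : Int) = (r : Int) ∧ (c : Int) = (c : Int))) := by
    intro h; exact h.2 ⟨rfl, rfl⟩
  have hup : pvPropDir grid (r : Int) (c : Int) (r : Int) (c : Int) (-1) 0 (pvFuel grid) =
      pvUp grid r c := by
    rw [hfuel, pvPropDir_succ, if_pos hcond, if_neg hself, List.nil_append]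
    simp only [add_zero]
    rw [show ((r : Nat) : Int) + -1 = ((r : Nat) : Int) - 1 from by ring]
    exact pvPropDir_back_col grid r c hr hc r _ (le_refl r) (by omega)
  have hdown : pvPropDir grid (r : Int) (c : Int) (r : Int) (c : Int) 1 0 (pvFuel grid) =
      pvDown grid (r + 1) c := by
    rw [hfuel, pvPropDir_succ, if_pos hcond, if_neg hself, List.nil_append]
    simp only [add_zero]
    rw [show ((r : Nat) : Int) + 1 = ((r + 1 : Nat) : Int) from by push_cast; ring]
    exact pvPropDir_fwd_col grid r c hc (grid.length - (r + 1)) (r + 1) _ (by omega) (by omega)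
      (by omega)
  have hleft : pvPropDir grid (r : Int) (c : Int) (r : Int) (c : Int) 0 (-1) (pvFuel grid) =
      pvLeft grid r c := by
    rw [hfuel, pvPropDir_succ, if_pos hcond, if_neg hself, List.nil_append]
    simp only [add_zero]
    rw [show ((c : Nat) : Int) + -1 = ((c : Nat) : Int) - 1 from by ring]
    exact pvPropDir_back_row grid r c hr hc c _ (le_refl c) (by omega)
  have hright : pvPropDir grid (r : Int) (c : Int) (r : Int) (c : Int) 0 1 (pvFuel grid) =
      pvRight grid r (c + 1) := by
    rw [hfuel, pvPropDir_succ, if_pos hcond, if_neg hself, List.nil_append]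
    simp only [add_zero]
    rw [show ((c : Nat) : Int) + 1 = ((c + 1 : Nat) : Int) from by push_cast; ring]
    exact pvPropDir_fwd_row grid r c hr ((grid.headD []).length - (c + 1)) (c + 1) _ (by omega)
      (by omega) (by omega)
  unfold pvPropagateSignal
  rw [hup, hdown, hleft, hright]
  rfl

theorem pvA_char (grid : List (List String)) :
    find_reachable_towers grid = pvSpecList grid := by
  unfold find_reachable_towers
  dsimp only
  rw [pvRange_cast grid.length, pvRange_cast (grid.headD []).length]
  rw [List.foldl_map]
  refine Eq.trans (PySem.List.foldl_congr_mem _ _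
    (fun (acc : List (Int × Int × List (Int × Int))) (r : Nat) =>
      acc ++ ((List.range (grid.headD []).length).filter
          (fun (c : Nat) => pvCell grid (r : Int) (c : Int) == "tower")).map
        (fun (c : Nat) => ((r : Int), (c : Int), pvVal grid r c))) _
    (by
      intro acc r hrmem
      have hr : r < grid.length := List.mem_range.mp hrmem
      rw [List.foldl_map]
      rw [PySem.List.foldl_append_if
        (p := fun (c : Nat) => pvCell grid (r : Int) (c : Int) == "tower")
        (f := fun (c : Nat) => ((r : Int), (c : Int), pvPropagateSignal grid (r : Int) (c : Int)))]
      congr 1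
      apply List.map_congr_left
      intro c hcmem
      have hcf := List.mem_filter.mp hcmem
      have hc : c < (grid.headD []).length := List.mem_range.mp hcf.1
      have htw : pvCell grid (r : Int) (c : Int) = "tower" := by
        have := hcf.2; simpa using this
      rw [pvPropagate_eq grid r c hr hc htw])) ?_
  rw [PySem.List.foldl_append_eq_flatMap]
  rfl

-- ===== B-side: sweep invariants =====
def pvFwdRun (grid : List (List String)) (r n : Nat)
    (colAcc : PySem.Dict Int (List (Int × Int)))
    (seen : PySem.Dict (Int × Int) (List (Int × Int) × List (Int × Int))) :
    PySem.Dict Int (List (Int × Int)) × List (Int × Int) ×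
      PySem.Dict (Int × Int) (List (Int × Int) × List (Int × Int)) :=
  ((List.range n).map (fun (k : Nat) => (k : Int))).foldl (pvSweepStep grid (r : Int))
    (colAcc, ([] : List (Int × Int)), seen)

theorem pvFwdInner (grid : List (List String)) (r : Nat) :
    ∀ (n : Nat), n ≤ (grid.headD []).length →
    ∀ (colAcc : PySem.Dict Int (List (Int × Int)))
      (seen : PySem.Dict (Int × Int) (List (Int × Int) × List (Int × Int))),
    (∀ c, c < (grid.headD []).length → colAcc.getD (c : Int) [] = (pvUp grid r c).reverse) →
    (∀ c, c < (grid.headD []).length →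
        (pvFwdRun grid r n colAcc seen).1.getD (c : Int) [] =
          if c < n then (pvUp grid (r+1) c).reverse else (pvUp grid r c).reverse)
    ∧ (pvFwdRun grid r n colAcc seen).2.1 = (pvLineBack (pvRowF grid r) (pvEmitRow r) n).reverse
    ∧ (∀ c, c < n → pvCell grid (r : Int) (c : Int) = "tower" → ∀ d,
        (pvFwdRun grid r n colAcc seen).2.2.getD ((r : Int), (c : Int)) d =
          (pvUp grid r c, pvLeft grid r c))
    ∧ (∀ k d, (∀ c, c < n → k ≠ ((r : Int), (c : Int))) →
        (pvFwdRun grid r n colAcc seen).2.2.getD k d = seen.getD k d) := by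
  intro n
  induction n with
  | zero =>
      intro hn colAcc seen hcol
      refine ⟨?_, ?_, ?_, ?_⟩
      · intro c hc
        simp only [pvFwdRun, List.range_zero, List.map_nil, List.foldl_nil]
        rw [if_neg (by omega)]
        exact hcol c hc
      · simp [pvFwdRun, pvLineBack]
      · intro c hc; exact absurd hc (by omega)
      · intro k d hk; simp [pvFwdRun]
  | succ n ih =>
      intro hn colAcc seen hcol
      obtain ⟨ih1, ih2, ih3, ih4⟩ := ih (by omega) colAcc seen hcol
      have hstep : pvFwdRun grid r (n+1) colAcc seen =
          pvSweepStep grid (r : Int) (pvFwdRun grid r n colAcc seen) (n : Int) := by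
        simp [pvFwdRun, List.range_succ]
      set st := pvFwdRun grid r n colAcc seen with hst
      rw [hstep]
      simp only [pvSweepStep]
      by_cases hob : pvCell grid (r : Int) (n : Int) = "obstacle"
      · rw [if_pos (by simp [hob])]
        refine ⟨?_, ?_, ?_, ?_⟩
        · intro c hc
          dsimp only
          rw [PySem.Dict.getD_insert]
          by_cases hcn : c = n
          · subst hcn
            rw [if_pos rfl, if_pos (by omega)]
            simp [pvUp, pvLineBack, pvColF, hob]
          · rw [if_neg (by exact_mod_cast hcn), ih1 c hc]
            by_cases hlt : c < n
            · rw [if_pos hlt, if_pos (by omega)]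
            · rw [if_neg hlt, if_neg (by omega)]
        · dsimp only
          simp [pvLineBack, pvRowF, hob]
        · intro c hc htw d
          by_cases hcn : c = n
          · subst hcn; rw [htw] at hob; exact absurd hob (by decide)
          · exact ih3 c (by omega) htw d
        · intro k d hk
          exact ih4 k d (fun c hc => hk c (by omega))
      · by_cases htw : pvCell grid (r : Int) (n : Int) = "tower"
        · rw [if_neg (by simp [hob]), if_pos (by simp [htw])]
          have hv : st.1.getD (n : Int) [] = (pvUp grid r n).reverse := by
            have h := ih1 n (by omega)
            rwa [if_neg (by omega)] at h
          refine ⟨?_, ?_, ?_, ?_⟩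
          · intro c hc
            dsimp only
            rw [PySem.Dict.getD_insert]
            by_cases hcn : c = n
            · subst hcn
              rw [if_pos rfl, if_pos (by omega), hv]
              simp [pvUp, pvLineBack, pvColF, pvEmitCol, htw]
            · rw [if_neg (by exact_mod_cast hcn), ih1 c hc]
              by_cases hlt : c < n
              · rw [if_pos hlt, if_pos (by omega)]
              · rw [if_neg hlt, if_neg (by omega)]
          · dsimp only
            rw [ih2]
            simp [pvLineBack, pvRowF, pvEmitRow, htw]
          · intro c hc htw' d
            dsimp only
            rw [PySem.Dict.getD_insert]
            by_cases hcn : c = n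
            · subst hcn
              rw [if_pos rfl, hv, ih2]
              simp [pvLeft]
            · rw [if_neg (by
                intro h
                rw [Prod.mk.injEq] at h
                exact hcn (by exact_mod_cast h.2))]
              exact ih3 c (by omega) htw' d
          · intro k d hk
            dsimp only
            rw [PySem.Dict.getD_insert, if_neg (hk n (by omega))]
            exact ih4 k d (fun c hc => hk c (by omega))
        · rw [if_neg (by simp [hob]), if_neg (by simp [htw])]
          refine ⟨?_, ?_, ?_, ?_⟩
          · intro c hc
            rw [ih1 c hc]
            by_cases hcn : c = n
            · subst hcn
              rw [if_neg (by omega), if_pos (by omega)]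
              simp [pvUp, pvLineBack, pvColF, hob, htw]
            · by_cases hlt : c < n
              · rw [if_pos hlt, if_pos (by omega)]
              · rw [if_neg hlt, if_neg (by omega)]
          · rw [ih2]
            simp [pvLineBack, pvRowF, hob, htw]
          · intro c hc htw' d
            by_cases hcn : c = n
            · subst hcn; exact absurd htw' htw
            · exact ih3 c (by omega) htw' d
          · intro k d hk
            exact ih4 k d (fun c hc => hk c (by omega))

def pvFwdOuter (grid : List (List String)) (m : Nat) :
    PySem.Dict Int (List (Int × Int)) ×
      PySem.Dict (Int × Int) (List (Int × Int) × List (Int × Int)) :=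
  ((List.range m).map (fun (k : Nat) => (k : Int))).foldl
    (pvSweepRow grid ((List.range (grid.headD []).length).map (fun (k : Nat) => (k : Int))))
    (PySem.Dict.empty, PySem.Dict.empty)

theorem pvFwdOuter_inv (grid : List (List String)) :
    ∀ (m : Nat),
    (∀ c, c < (grid.headD []).length →
        (pvFwdOuter grid m).1.getD (c : Int) [] = (pvUp grid m c).reverse)
    ∧ (∀ r' c, r' < m → c < (grid.headD []).length →
        pvCell grid (r' : Int) (c : Int) = "tower" → ∀ d,
        (pvFwdOuter grid m).2.getD ((r' : Int), (c : Int)) d =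
          (pvUp grid r' c, pvLeft grid r' c)) := by
  intro m
  induction m with
  | zero =>
      constructor
      · intro c hc; simp [pvFwdOuter, pvUp, pvLineBack]
      · intro r' c hr' hc htw d; exact absurd hr' (by omega)
  | succ m ih =>
      obtain ⟨ih1, ih2⟩ := ih
      have hstep : pvFwdOuter grid (m+1) =
          pvSweepRow grid ((List.range (grid.headD []).length).map (fun (k : Nat) => (k : Int)))
            (pvFwdOuter grid m) (m : Int) := by
        simp [pvFwdOuter, List.range_succ]
      have hrow : pvSweepRow grid
          ((List.range (grid.headD []).length).map (fun (k : Nat) => (k : Int)))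
          (pvFwdOuter grid m) (m : Int) =
          ((pvFwdRun grid m (grid.headD []).length (pvFwdOuter grid m).1 (pvFwdOuter grid m).2).1,
           (pvFwdRun grid m (grid.headD []).length (pvFwdOuter grid m).1 (pvFwdOuter grid m).2).2.2) := rfl
      obtain ⟨c1, _, c3, c4⟩ :=
        pvFwdInner grid m (grid.headD []).length (le_refl _) (pvFwdOuter grid m).1
          (pvFwdOuter grid m).2 ih1
      rw [hstep, hrow]
      constructor
      · intro c hc
        rw [c1 c hc, if_pos hc]
      · intro r' c hr' hc htw d
        by_cases hrm : r' = m
        · subst hrm; exact c3 c hc htw d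
        · rw [c4 ((r' : Int), (c : Int)) d (by
            intro c' _ h
            rw [Prod.mk.injEq] at h
            exact hrm (by exact_mod_cast h.1))]
          exact ih2 r' c (by omega) hc htw d

theorem pvFwd_getD (grid : List (List String)) (r c : Nat)
    (hr : r < grid.length) (hc : c < (grid.headD []).length)
    (htw : pvCell grid (r : Int) (c : Int) = "tower") (d : List (Int × Int) × List (Int × Int)) :
    (pvSweep grid ((List.range grid.length).map (fun (k : Nat) => (k : Int)))
        ((List.range (grid.headD []).length).map (fun (k : Nat) => (k : Int)))).getD
      ((r : Int), (c : Int)) d = (pvUp grid r c, pvLeft grid r c) := by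
  exact (pvFwdOuter_inv grid grid.length).2 r c hr hc htw d

-- backward sweep
theorem pvRange_countdown (n : Nat) :
    PySem.List.pyRange ((n : Int) - 1) (-1) (-1) =
      (List.range n).map (fun (k : Nat) => (n : Int) - 1 - (k : Int)) := by
  rw [PySem.List.pyRange_neg_one]
  have h1 : ((n : Int) - 1 - (-1)).toNat = n := by omega
  rw [h1]

def pvBwdRun (grid : List (List String)) (r n : Nat)
    (colAcc : PySem.Dict Int (List (Int × Int)))
    (seen : PySem.Dict (Int × Int) (List (Int × Int) × List (Int × Int))) :
    PySem.Dict Int (List (Int × Int)) × List (Int × Int) ×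
      PySem.Dict (Int × Int) (List (Int × Int) × List (Int × Int)) :=
  ((List.range n).map (fun (k : Nat) => ((grid.headD []).length : Int) - 1 - (k : Int))).foldl
    (pvSweepStep grid (r : Int)) (colAcc, ([] : List (Int × Int)), seen)

theorem pvBwdInner (grid : List (List String)) (r : Nat) (hr : r < grid.length) :
    ∀ (n : Nat), n ≤ (grid.headD []).length →
    ∀ (colAcc : PySem.Dict Int (List (Int × Int)))
      (seen : PySem.Dict (Int × Int) (List (Int × Int) × List (Int × Int))),
    (∀ c, c < (grid.headD []).length → colAcc.getD (c : Int) [] =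
        (pvLineFwd (pvColF grid c) (pvEmitCol c) (grid.length - (r+1)) (r+1)).reverse) →
    (∀ c, c < (grid.headD []).length →
        (pvBwdRun grid r n colAcc seen).1.getD (c : Int) [] =
          if (grid.headD []).length - n ≤ c then
            (pvLineFwd (pvColF grid c) (pvEmitCol c) (grid.length - r) r).reverse
          else (pvLineFwd (pvColF grid c) (pvEmitCol c) (grid.length - (r+1)) (r+1)).reverse)
    ∧ (pvBwdRun grid r n colAcc seen).2.1 =
        (pvLineFwd (pvRowF grid r) (pvEmitRow r) n ((grid.headD []).length - n)).reverse
    ∧ (∀ c, (grid.headD []).length - n ≤ c → c < (grid.headD []).length →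
        pvCell grid (r : Int) (c : Int) = "tower" → ∀ d,
        (pvBwdRun grid r n colAcc seen).2.2.getD ((r : Int), (c : Int)) d =
          (pvDown grid (r+1) c, pvRight grid r (c+1)))
    ∧ (∀ k d, (∀ c, (grid.headD []).length - n ≤ c → c < (grid.headD []).length →
          k ≠ ((r : Int), (c : Int))) →
        (pvBwdRun grid r n colAcc seen).2.2.getD k d = seen.getD k d) := by
  intro n
  induction n with
  | zero =>
      intro hn colAcc seen hcol
      refine ⟨?_, ?_, ?_, ?_⟩
      · intro c hc
        simp only [pvBwdRun, List.range_zero, List.map_nil, List.foldl_nil]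
        rw [if_neg (by omega)]
        exact hcol c hc
      · simp [pvBwdRun, pvLineFwd]
      · intro c hc1 hc2 htw d; exact absurd hc1 (by omega)
      · intro k d hk; simp [pvBwdRun]
  | succ n ih =>
      intro hn colAcc seen hcol
      obtain ⟨ih1, ih2, ih3, ih4⟩ := ih (by omega) colAcc seen hcol
      have hC : 0 < (grid.headD []).length := by omega
      set C := (grid.headD []).length with hCdef
      set c0 := C - 1 - n with hc0
      have hcast : (C : Int) - 1 - (n : Int) = ((c0 : Nat) : Int) := by omega
      have hstep : pvBwdRun grid r (n+1) colAcc seen =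
          pvSweepStep grid (r : Int) (pvBwdRun grid r n colAcc seen) ((c0 : Nat) : Int) := by
        rw [pvBwdRun, List.range_succ, List.map_append, List.foldl_append,
          show List.map (fun (k : Nat) => (((grid.headD []).length : Int)) - 1 - (k : Int)) [n]
              = [((c0 : Nat) : Int)] from by
            simp only [List.map_cons, List.map_nil, List.cons.injEq, and_true]; omega,
          List.foldl_cons, List.foldl_nil]
        rfl
      have hCn : C - n = c0 + 1 := by omega
      have hCn1 : C - (n+1) = c0 := by omega
      have hRr : grid.length - r = (grid.length - (r+1)) + 1 := by omega
      set st := pvBwdRun grid r n colAcc seen with hst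
      rw [hstep]
      simp only [pvSweepStep]
      have hold : st.1.getD ((c0 : Nat) : Int) [] =
          (pvLineFwd (pvColF grid c0) (pvEmitCol c0) (grid.length - (r+1)) (r+1)).reverse := by
        have h := ih1 c0 (by omega)
        rwa [if_neg (by omega)] at h
      by_cases hob : pvCell grid (r : Int) (c0 : Int) = "obstacle"
      · rw [if_pos (by simp [hob])]
        refine ⟨?_, ?_, ?_, ?_⟩
        · intro c hc
          dsimp only
          rw [PySem.Dict.getD_insert]
          by_cases hcn : c = c0
          · subst hcn
            rw [if_pos rfl, if_pos (by omega), hRr]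
            simp [pvLineFwd, pvColF, hob]
          · rw [if_neg (by exact_mod_cast hcn), ih1 c hc]
            by_cases hlt : C - n ≤ c
            · rw [if_pos hlt, if_pos (by omega)]
            · rw [if_neg hlt, if_neg (by omega)]
        · dsimp only
          rw [hCn1]
          simp [pvLineFwd, pvRowF, hob]
        · intro c hc1 hc2 htw d
          by_cases hcn : c = c0
          · subst hcn; rw [htw] at hob; exact absurd hob (by decide)
          · exact ih3 c (by omega) hc2 htw d
        · intro k d hk
          exact ih4 k d (fun c hc1 hc2 => hk c (by omega) hc2)
      · by_cases htw : pvCell grid (r : Int) (c0 : Int) = "tower"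
        · rw [if_neg (by simp [hob]), if_pos (by simp [htw])]
          refine ⟨?_, ?_, ?_, ?_⟩
          · intro c hc
            dsimp only
            rw [PySem.Dict.getD_insert]
            by_cases hcn : c = c0
            · subst hcn
              rw [if_pos rfl, if_pos (by omega), hold, hRr]
              simp [pvLineFwd, pvColF, pvEmitCol, htw]
            · rw [if_neg (by exact_mod_cast hcn), ih1 c hc]
              by_cases hlt : C - n ≤ c
              · rw [if_pos hlt, if_pos (by omega)]
              · rw [if_neg hlt, if_neg (by omega)]
          · dsimp only
            rw [ih2, hCn1, hCn]
            simp [pvLineFwd, pvRowF, pvEmitRow, htw]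
          · intro c hc1 hc2 htw' d
            dsimp only
            rw [PySem.Dict.getD_insert]
            by_cases hcn : c = c0
            · subst hcn
              rw [if_pos rfl, hold, ih2]
              have h1 : pvDown grid (r+1) c0 =
                  pvLineFwd (pvColF grid c0) (pvEmitCol c0) (grid.length - (r+1)) (r+1) := rfl
              have h2 : pvRight grid r (c0+1) =
                  pvLineFwd (pvRowF grid r) (pvEmitRow r) n (C - n) := by
                rw [pvRight, hCn]
                have : C - (c0 + 1) = n := by omega
                rw [← hCdef, this]
              rw [h1, h2]
              simp
            · rw [if_neg (by
                intro h
                rw [Prod.mk.injEq] at h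
                exact hcn (by exact_mod_cast h.2))]
              exact ih3 c (by omega) hc2 htw' d
          · intro k d hk
            dsimp only
            rw [PySem.Dict.getD_insert, if_neg (hk c0 (by omega) (by omega))]
            exact ih4 k d (fun c hc1 hc2 => hk c (by omega) hc2)
        · rw [if_neg (by simp [hob]), if_neg (by simp [htw])]
          refine ⟨?_, ?_, ?_, ?_⟩
          · intro c hc
            rw [ih1 c hc]
            by_cases hcn : c = c0
            · subst hcn
              rw [if_neg (by omega), if_pos (by omega), hRr]
              simp [pvLineFwd, pvColF, hob, htw]
            · by_cases hlt : C - n ≤ c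
              · rw [if_pos hlt, if_pos (by omega)]
              · rw [if_neg hlt, if_neg (by omega)]
          · rw [ih2, hCn1, hCn]
            simp [pvLineFwd, pvRowF, hob, htw]
          · intro c hc1 hc2 htw' d
            by_cases hcn : c = c0
            · subst hcn; exact absurd htw' htw
            · exact ih3 c (by omega) hc2 htw' d
          · intro k d hk
            exact ih4 k d (fun c hc1 hc2 => hk c (by omega) hc2)

def pvBwdOuter (grid : List (List String)) (m : Nat) :
    PySem.Dict Int (List (Int × Int)) ×
      PySem.Dict (Int × Int) (List (Int × Int) × List (Int × Int)) :=
  ((List.range m).map (fun (k : Nat) => (grid.length : Int) - 1 - (k : Int))).foldl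
    (pvSweepRow grid
      ((List.range (grid.headD []).length).map
        (fun (k : Nat) => ((grid.headD []).length : Int) - 1 - (k : Int))))
    (PySem.Dict.empty, PySem.Dict.empty)

theorem pvBwdOuter_inv (grid : List (List String)) :
    ∀ (m : Nat), m ≤ grid.length →
    (∀ c, c < (grid.headD []).length →
        (pvBwdOuter grid m).1.getD (c : Int) [] =
          (pvLineFwd (pvColF grid c) (pvEmitCol c) m (grid.length - m)).reverse)
    ∧ (∀ r' c, grid.length - m ≤ r' → r' < grid.length → c < (grid.headD []).length →
        pvCell grid (r' : Int) (c : Int) = "tower" → ∀ d,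
        (pvBwdOuter grid m).2.getD ((r' : Int), (c : Int)) d =
          (pvDown grid (r'+1) c, pvRight grid r' (c+1))) := by
  intro m
  induction m with
  | zero =>
      intro hm
      constructor
      · intro c hc; simp [pvBwdOuter, pvLineFwd]
      · intro r' c hr1 hr2 hc htw d; exact absurd hr1 (by omega)
  | succ m ih =>
      intro hm
      obtain ⟨ih1, ih2⟩ := ih (by omega)
      set r0 := grid.length - 1 - m with hr0
      have hr0lt : r0 < grid.length := by omega
      have hcast : (grid.length : Int) - 1 - (m : Int) = ((r0 : Nat) : Int) := by omega
      have hstep : pvBwdOuter grid (m+1) =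
          pvSweepRow grid
            ((List.range (grid.headD []).length).map
              (fun (k : Nat) => ((grid.headD []).length : Int) - 1 - (k : Int)))
            (pvBwdOuter grid m) ((r0 : Nat) : Int) := by
        rw [pvBwdOuter, List.range_succ, List.map_append, List.foldl_append,
          show List.map (fun (k : Nat) => ((grid.length : Int)) - 1 - (k : Int)) [m]
              = [((r0 : Nat) : Int)] from by
            simp only [List.map_cons, List.map_nil, List.cons.injEq, and_true]; omega,
          List.foldl_cons, List.foldl_nil]
        rfl
      have hrow : pvSweepRow grid
          ((List.range (grid.headD []).length).map
            (fun (k : Nat) => ((grid.headD []).length : Int) - 1 - (k : Int)))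
          (pvBwdOuter grid m) ((r0 : Nat) : Int) =
          ((pvBwdRun grid r0 (grid.headD []).length (pvBwdOuter grid m).1 (pvBwdOuter grid m).2).1,
           (pvBwdRun grid r0 (grid.headD []).length (pvBwdOuter grid m).1 (pvBwdOuter grid m).2).2.2) := rfl
      have hcol0 : ∀ c, c < (grid.headD []).length →
          (pvBwdOuter grid m).1.getD (c : Int) [] =
            (pvLineFwd (pvColF grid c) (pvEmitCol c) (grid.length - (r0+1)) (r0+1)).reverse := by
        intro c hc
        rw [ih1 c hc]
        have h1 : grid.length - (r0+1) = m := by omega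
        have h2 : r0 + 1 = grid.length - m := by omega
        rw [h1, h2]
      obtain ⟨c1, _, c3, c4⟩ :=
        pvBwdInner grid r0 hr0lt (grid.headD []).length (le_refl _) (pvBwdOuter grid m).1
          (pvBwdOuter grid m).2 hcol0
      rw [hstep, hrow]
      constructor
      · intro c hc
        rw [c1 c hc, if_pos (by omega)]
        have h1 : grid.length - r0 = m + 1 := by omega
        have h2 : r0 = grid.length - (m+1) := by omega
        rw [h1, ← h2]
      · intro r' c hr1 hr2 hc htw d
        by_cases hrm : r' = r0
        · subst hrm; exact c3 c (by omega) hc htw d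
        · rw [c4 ((r' : Int), (c : Int)) d (by
            intro c' _ _ h
            rw [Prod.mk.injEq] at h
            exact hrm (by exact_mod_cast h.1))]
          exact ih2 r' c (by omega) hr2 hc htw d

theorem pvBwd_getD (grid : List (List String)) (r c : Nat)
    (hr : r < grid.length) (hc : c < (grid.headD []).length)
    (htw : pvCell grid (r : Int) (c : Int) = "tower") (d : List (Int × Int) × List (Int × Int)) :
    (pvSweep grid (PySem.List.pyRange ((grid.length : Int) - 1) (-1) (-1))
        (PySem.List.pyRange (((grid.headD []).length : Int) - 1) (-1) (-1))).getD
      ((r : Int), (c : Int)) d = (pvDown grid (r+1) c, pvRight grid r (c+1)) := by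
  unfold pvSweep
  rw [pvRange_countdown, pvRange_countdown]
  exact (pvBwdOuter_inv grid grid.length (le_refl _)).2 r c (by omega) hr hc htw d

theorem pvB_char (grid : List (List String)) :
    find_reachable_towers_alt grid = pvSpecList grid := by
  unfold find_reachable_towers_alt
  dsimp only
  rw [pvRange_cast grid.length, pvRange_cast (grid.headD []).length]
  rw [List.foldl_map]
  refine Eq.trans (PySem.List.foldl_congr_mem _ _
    (fun (acc : List (Int × Int × List (Int × Int))) (r : Nat) =>
      acc ++ ((List.range (grid.headD []).length).filter
          (fun (c : Nat) => pvCell grid (r : Int) (c : Int) == "tower")).map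
        (fun (c : Nat) => ((r : Int), (c : Int), pvVal grid r c))) _
    (by
      intro acc r hrmem
      have hr : r < grid.length := List.mem_range.mp hrmem
      rw [List.foldl_map]
      rw [PySem.List.foldl_append_if
        (p := fun (c : Nat) => pvCell grid (r : Int) (c : Int) == "tower")
        (f := fun (c : Nat) => ((r : Int), (c : Int),
          ((pvSweep grid ((List.range grid.length).map (fun (k : Nat) => (k : Int)))
              ((List.range (grid.headD []).length).map (fun (k : Nat) => (k : Int)))).getD
                ((r : Int), (c : Int)) ([], [])).1 ++
          ((pvSweep grid (PySem.List.pyRange ((grid.length : Int) - 1) (-1) (-1))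
              (PySem.List.pyRange (((grid.headD []).length : Int) - 1) (-1) (-1))).getD
                ((r : Int), (c : Int)) ([], [])).1 ++
          ((pvSweep grid ((List.range grid.length).map (fun (k : Nat) => (k : Int)))
              ((List.range (grid.headD []).length).map (fun (k : Nat) => (k : Int)))).getD
                ((r : Int), (c : Int)) ([], [])).2 ++
          ((pvSweep grid (PySem.List.pyRange ((grid.length : Int) - 1) (-1) (-1))
              (PySem.List.pyRange (((grid.headD []).length : Int) - 1) (-1) (-1))).getD
                ((r : Int), (c : Int)) ([], [])).2))]
      congr 1
      apply List.map_congr_left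
      intro c hcmem
      have hcf := List.mem_filter.mp hcmem
      have hc : c < (grid.headD []).length := List.mem_range.mp hcf.1
      have htw : pvCell grid (r : Int) (c : Int) = "tower" := by
        have := hcf.2; simpa using this
      rw [pvFwd_getD grid r c hr hc htw, pvBwd_getD grid r c hr hc htw]
      show ((r : Int), (c : Int),
        pvUp grid r c ++ pvDown grid (r+1) c ++ pvLeft grid r c ++ pvRight grid r (c+1)) = _
      rw [pvVal])) ?_
  rw [PySem.List.foldl_append_eq_flatMap]
  rfl

-- ===== VERDICT (by name: the statement is the Claim_ definition above) =====
theorem find_reachable_towers_spec : Claim_equal_find_reachable_towers := by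
  intro grid _ _
  unfold Spec_find_reachable_towers
  rw [pvA_char, pvB_char]
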